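-- pv_equiv track=rewrite | github.com/bishal5917/LeetCoding | Python/MaximizeExpression.py | MaximizeExpression
-- ===== SOURCE A (Python) =====
-- def MaximizeExpression(arr):
--     currentMax = 0
--     for a in range(0, len(arr)):
--         for b in range(a, len(arr)):
--             for c in range(b, len(arr)):
--                 for d in range(c, len(arr)):
--                     if a < b and b < c and c < d:
--                         currentMax = max(arr[a] - arr[b] + arr[c] - arr[d], currentMax)
--
--     return currentMax
-- ===== SOURCE B (Python) =====
-- def _omax(a, b):
--     if a is None:
--         return b
--     if b is None:
--         return a
--     return max(a, b)
--
--
-- def MaximizeExpression(arr):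
--     # Right-to-left DP: t1..t4 are the best values of -z, y-z, -x+y-z, w-x+y-z
--     # over strictly increasing index tuples taken from the suffix already scanned.
--     t1 = t2 = t3 = t4 = None
--     for v in reversed(arr):
--         t1, t2, t3, t4 = (
--             _omax(t1, -v),
--             _omax(t2, None if t1 is None else t1 + v),
--             _omax(t3, None if t2 is None else t2 - v),
--             _omax(t4, None if t3 is None else t3 + v),
--         )
--     return 0 if t4 is None else max(0, t4)
-- ===== Notes on version B (the rewrite author's own statement) =====
-- stated objective: faster
-- what changed: Replaced the quadruple nested index loop with a single right-to-left pass maintaining four running maxima of the partial expressions -z, y-z, -x+y-z and w-x+y-z.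
import Mathlib
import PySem

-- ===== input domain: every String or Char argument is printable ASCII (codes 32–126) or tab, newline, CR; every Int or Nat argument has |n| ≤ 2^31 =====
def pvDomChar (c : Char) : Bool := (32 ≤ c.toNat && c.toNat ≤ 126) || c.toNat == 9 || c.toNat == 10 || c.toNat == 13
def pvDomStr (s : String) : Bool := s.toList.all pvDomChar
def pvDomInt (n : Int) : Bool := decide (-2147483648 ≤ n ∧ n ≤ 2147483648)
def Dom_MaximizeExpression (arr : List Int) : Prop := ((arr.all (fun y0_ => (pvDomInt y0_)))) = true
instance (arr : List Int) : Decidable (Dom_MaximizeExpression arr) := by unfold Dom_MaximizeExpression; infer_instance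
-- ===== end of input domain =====

-- B replaces A's quadruple nested index loop by one right-to-left pass keeping four
-- running maxima of the partial expressions -z, y-z, -x+y-z, w-x+y-z (objective: faster).

-- ===== PORT A =====
def MaximizeExpression (arr : List Int) : Int :=
  (PySem.List.pyRange 0 (PySem.List.len arr) 1).foldl (fun cur a =>
    (PySem.List.pyRange a (PySem.List.len arr) 1).foldl (fun cur b =>
      (PySem.List.pyRange b (PySem.List.len arr) 1).foldl (fun cur c =>
        (PySem.List.pyRange c (PySem.List.len arr) 1).foldl (fun cur d =>
          if a < b ∧ b < c ∧ c < d then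
            max (PySem.List.pyGetD arr a 0 - PySem.List.pyGetD arr b 0 +
                 PySem.List.pyGetD arr c 0 - PySem.List.pyGetD arr d 0) cur
          else cur) cur) cur) cur) 0

-- ===== PORT B =====
-- _omax in Source B
def omaxI (a b : Option Int) : Option Int :=
  match a, b with
  | none, b => b
  | some x, none => some x
  | some x, some y => some (max x y)

-- the loop body of Source B (tuple assignment from the old t1..t4)
def stepB (s : Option Int × Option Int × Option Int × Option Int) (v : Int) :
    Option Int × Option Int × Option Int × Option Int :=
  match s with
  | (t1, t2, t3, t4) =>
    (omaxI t1 (some (-v)),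
     omaxI t2 (t1.map (fun x => x + v)),
     omaxI t3 (t2.map (fun x => x - v)),
     omaxI t4 (t3.map (fun x => x + v)))

def MaximizeExpression_alt (arr : List Int) : Int :=
  match (arr.reverse.foldl stepB (none, none, none, none)).2.2.2 with
  | none => 0
  | some m => max 0 m

-- ===== PRECONDITION & SPEC =====
def Spec_MaximizeExpression (arr : List Int) (out : Int) : Prop := out = MaximizeExpression_alt arr
instance (arr : List Int) (out : Int) : Decidable (Spec_MaximizeExpression arr out) := by unfold Spec_MaximizeExpression; infer_instance

-- ===== CLAIM (what is proved, stated in full; the proofs are below) =====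
def Claim_equal_MaximizeExpression : Prop := ∀ (arr : List Int), Dom_MaximizeExpression arr → Spec_MaximizeExpression arr (MaximizeExpression arr)

-- ===== LEMMAS AND PROOFS =====

-- maximum of a list of candidate values, as B's optional running maximum
def mxl : List Int → Option Int
  | [] => none
  | x :: xs => omaxI (some x) (mxl xs)

-- value families: G1 l = all -z, G2 l = all y-z, G3 l = all -x+y-z, G4 l = all w-x+y-z
-- over strictly increasing index tuples of l, enumerated in lexicographic index order
def G1 (l : List Int) : List Int := l.map (fun z => -z)
def G2 : List Int → List Int
  | [] => []
  | y :: ys => (G1 ys).map (fun v => y + v) ++ G2 ys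
def G3 : List Int → List Int
  | [] => []
  | x :: xs => (G2 xs).map (fun v => v - x) ++ G3 xs
def G4 : List Int → List Int
  | [] => []
  | w :: ws => (G3 ws).map (fun v => w + v) ++ G4 ws

-- A's running max over a list of candidates
def runMax (l : List Int) (i : Int) : Int := l.foldl (fun c y => max y c) i

theorem omaxI_comm (a b : Option Int) : omaxI a b = omaxI b a := by
  cases a <;> cases b <;> simp [omaxI, max_comm]

theorem omaxI_assoc (a b c : Option Int) : omaxI (omaxI a b) c = omaxI a (omaxI b c) := by
  cases a <;> cases b <;> cases c <;> simp [omaxI, max_assoc]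

theorem mxl_append (l1 l2 : List Int) : mxl (l1 ++ l2) = omaxI (mxl l1) (mxl l2) := by
  induction l1 with
  | nil => simp [mxl, omaxI]
  | cons x xs ih => simp [mxl, ih, omaxI_assoc]

theorem mxl_map_addl (c : Int) (l : List Int) :
    mxl (l.map (fun v => c + v)) = (mxl l).map (fun x => x + c) := by
  induction l with
  | nil => simp [mxl]
  | cons x xs ih =>
    simp only [List.map_cons, mxl, ih]
    cases h : mxl xs
    · simp [omaxI]; omega
    · simp [omaxI]; omega

theorem mxl_map_sub (c : Int) (l : List Int) :
    mxl (l.map (fun v => v - c)) = (mxl l).map (fun x => x - c) := by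
  induction l with
  | nil => simp [mxl]
  | cons x xs ih =>
    simp only [List.map_cons, mxl, ih]
    cases h : mxl xs
    · simp [omaxI]
    · simp [omaxI]; omega

theorem runMax_append (l1 l2 : List Int) (i : Int) :
    runMax (l1 ++ l2) i = runMax l2 (runMax l1 i) := by
  simp [runMax, List.foldl_append]

theorem runMax_eq (l : List Int) (i : Int) :
    runMax l i = (match mxl l with | none => i | some m => max i m) := by
  induction l generalizing i with
  | nil => simp [runMax, mxl]
  | cons x xs ih =>
    show runMax xs (max x i) = _
    rw [ih]
    simp only [mxl]
    cases h : mxl xs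
    · simp [omaxI, max_comm]
    · simp [omaxI, max_left_comm]

theorem foldl_runMax {α : Type} (l : List α) (g : α → List Int) (i : Int) :
    l.foldl (fun cur x => runMax (g x) cur) i = runMax (l.flatMap g) i := by
  induction l generalizing i with
  | nil => simp [runMax]
  | cons x xs ih => simp [List.flatMap_cons, runMax_append, ih]

theorem mxl_G1_cons (v : Int) (xs : List Int) :
    mxl (G1 (v :: xs)) = omaxI (mxl (G1 xs)) (some (-v)) := by
  simp [G1, mxl, omaxI_comm]

theorem mxl_G2_cons (v : Int) (xs : List Int) :
    mxl (G2 (v :: xs)) = omaxI (mxl (G2 xs)) ((mxl (G1 xs)).map (fun x => x + v)) := by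
  rw [show G2 (v :: xs) = (G1 xs).map (fun u => v + u) ++ G2 xs from rfl, mxl_append,
      mxl_map_addl, omaxI_comm]

theorem mxl_G3_cons (v : Int) (xs : List Int) :
    mxl (G3 (v :: xs)) = omaxI (mxl (G3 xs)) ((mxl (G2 xs)).map (fun x => x - v)) := by
  rw [show G3 (v :: xs) = (G2 xs).map (fun u => u - v) ++ G3 xs from rfl, mxl_append,
      mxl_map_sub, omaxI_comm]

theorem mxl_G4_cons (v : Int) (xs : List Int) :
    mxl (G4 (v :: xs)) = omaxI (mxl (G4 xs)) ((mxl (G3 xs)).map (fun x => x + v)) := by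
  rw [show G4 (v :: xs) = (G3 xs).map (fun u => v + u) ++ G4 xs from rfl, mxl_append,
      mxl_map_addl, omaxI_comm]

-- B's loop invariant: the four accumulators are the maxima of the four value families
theorem B_inv (l : List Int) :
    l.foldr (fun v s => stepB s v) (none, none, none, none) =
      (mxl (G1 l), mxl (G2 l), mxl (G3 l), mxl (G4 l)) := by
  induction l with
  | nil => simp [G1, G2, G3, G4, mxl]
  | cons v xs ih =>
    rw [List.foldr_cons, ih, mxl_G1_cons, mxl_G2_cons, mxl_G3_cons, mxl_G4_cons]
    rfl

-- A-side: the four nested loops enumerate exactly G4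
theorem L1 (arr : List Int) : ∀ (m k : ℕ) (a b c : Int), arr.length = k + m → a < b → b < c → c < (k : Int) →
    (PySem.List.pyRange (k : Int) (arr.length : Int) 1).flatMap (fun d =>
      if a < b ∧ b < c ∧ c < d then
        [PySem.List.pyGetD arr a 0 - PySem.List.pyGetD arr b 0 +
         PySem.List.pyGetD arr c 0 - PySem.List.pyGetD arr d 0]
      else []) =
    (G1 (arr.drop k)).map (fun v =>
      (PySem.List.pyGetD arr a 0 - PySem.List.pyGetD arr b 0 + PySem.List.pyGetD arr c 0) + v) := by
  intro m
  induction m with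
  | zero =>
    intro k a b c hlen _ _ _
    rw [PySem.List.pyRange_one_eq_nil (by omega)]
    rw [List.drop_eq_nil_of_le (by omega)]
    simp [G1]
  | succ m ih =>
    intro k a b c hlen hab hbc hck
    have hk : k < arr.length := by omega
    rw [PySem.List.pyRange_one_cons (by exact_mod_cast hk), List.flatMap_cons,
        if_pos ⟨hab, hbc, hck⟩,
        show ((k : Int) + 1) = ((k + 1 : ℕ) : Int) by push_cast; ring,
        ih (k + 1) a b c (by omega) hab hbc (by push_cast; omega),
        List.drop_eq_getElem_cons hk]
    have hgk : PySem.List.pyGetD arr (k : Int) 0 = arr[k] := by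
      rw [PySem.List.pyGetD_natCast]; exact List.getD_eq_getElem arr 0 hk
    simp only [G1, List.map_cons, hgk, List.singleton_append, List.cons.injEq]
    constructor
    · ring
    · trivial

theorem L2 (arr : List Int) : ∀ (m k : ℕ) (a b : Int), arr.length = k + m → a < b → b < (k : Int) →
    (PySem.List.pyRange (k : Int) (arr.length : Int) 1).flatMap (fun c =>
      (PySem.List.pyRange c (arr.length : Int) 1).flatMap (fun d =>
        if a < b ∧ b < c ∧ c < d then
          [PySem.List.pyGetD arr a 0 - PySem.List.pyGetD arr b 0 +
           PySem.List.pyGetD arr c 0 - PySem.List.pyGetD arr d 0]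
        else [])) =
    (G2 (arr.drop k)).map (fun v =>
      (PySem.List.pyGetD arr a 0 - PySem.List.pyGetD arr b 0) + v) := by
  intro m
  induction m with
  | zero =>
    intro k a b hlen _ _
    rw [PySem.List.pyRange_one_eq_nil (by omega), List.drop_eq_nil_of_le (by omega)]
    simp [G2]
  | succ m ih =>
    intro k a b hlen hab hbk
    have hk : k < arr.length := by omega
    rw [PySem.List.pyRange_one_cons (by exact_mod_cast hk), List.flatMap_cons,
        PySem.List.pyRange_one_cons (by exact_mod_cast hk), List.flatMap_cons,
        if_neg (by omega), List.nil_append,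
        show ((k : Int) + 1) = ((k + 1 : ℕ) : Int) by push_cast; ring,
        L1 arr m (k + 1) a b (k : Int) (by omega) hab hbk (by push_cast; omega),
        ih (k + 1) a b (by omega) hab (by push_cast; omega),
        List.drop_eq_getElem_cons hk]
    have hgk : PySem.List.pyGetD arr (k : Int) 0 = arr[k] := by
      rw [PySem.List.pyGetD_natCast]; exact List.getD_eq_getElem arr 0 hk
    simp only [hgk, G2, List.map_append, List.map_map]
    congr 1
    apply List.map_congr_left
    intro v _
    simp only [Function.comp_apply]
    ring

theorem L3 (arr : List Int) : ∀ (m k : ℕ) (a : Int), arr.length = k + m → a < (k : Int) →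
    (PySem.List.pyRange (k : Int) (arr.length : Int) 1).flatMap (fun b =>
      (PySem.List.pyRange b (arr.length : Int) 1).flatMap (fun c =>
        (PySem.List.pyRange c (arr.length : Int) 1).flatMap (fun d =>
          if a < b ∧ b < c ∧ c < d then
            [PySem.List.pyGetD arr a 0 - PySem.List.pyGetD arr b 0 +
             PySem.List.pyGetD arr c 0 - PySem.List.pyGetD arr d 0]
          else []))) =
    (G3 (arr.drop k)).map (fun v => PySem.List.pyGetD arr a 0 + v) := by
  intro m
  induction m with
  | zero =>
    intro k a hlen _
    rw [PySem.List.pyRange_one_eq_nil (by omega), List.drop_eq_nil_of_le (by omega)]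
    simp [G3]
  | succ m ih =>
    intro k a hlen hak
    have hk : k < arr.length := by
      omega
    rw [PySem.List.pyRange_one_cons (by exact_mod_cast hk), List.flatMap_cons,
        PySem.List.pyRange_one_cons (by exact_mod_cast hk), List.flatMap_cons]
    have hnil : (PySem.List.pyRange (k : Int) (arr.length : Int) 1).flatMap (fun d =>
        if a < (k : Int) ∧ (k : Int) < (k : Int) ∧ (k : Int) < d then
          [PySem.List.pyGetD arr a 0 - PySem.List.pyGetD arr (k : Int) 0 +
           PySem.List.pyGetD arr (k : Int) 0 - PySem.List.pyGetD arr d 0]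
        else []) = [] := by
      simp
    rw [hnil, List.nil_append,
        show ((k : Int) + 1) = ((k + 1 : ℕ) : Int) by push_cast; ring,
        L2 arr m (k + 1) a (k : Int) (by omega) hak (by push_cast; omega),
        ih (k + 1) a (by omega) (by push_cast; omega),
        List.drop_eq_getElem_cons hk]
    have hgk : PySem.List.pyGetD arr (k : Int) 0 = arr[k] := by
      rw [PySem.List.pyGetD_natCast]; exact List.getD_eq_getElem arr 0 hk
    simp only [hgk, G3, List.map_append, List.map_map]
    congr 1
    apply List.map_congr_left
    intro v _
    simp only [Function.comp_apply]
    ring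

theorem L4 (arr : List Int) : ∀ (m k : ℕ), arr.length = k + m →
    (PySem.List.pyRange (k : Int) (arr.length : Int) 1).flatMap (fun a =>
      (PySem.List.pyRange a (arr.length : Int) 1).flatMap (fun b =>
        (PySem.List.pyRange b (arr.length : Int) 1).flatMap (fun c =>
          (PySem.List.pyRange c (arr.length : Int) 1).flatMap (fun d =>
            if a < b ∧ b < c ∧ c < d then
              [PySem.List.pyGetD arr a 0 - PySem.List.pyGetD arr b 0 +
               PySem.List.pyGetD arr c 0 - PySem.List.pyGetD arr d 0]
            else [])))) =
    G4 (arr.drop k) := by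
  intro m
  induction m with
  | zero =>
    intro k hlen
    rw [PySem.List.pyRange_one_eq_nil (by omega), List.drop_eq_nil_of_le (by omega)]
    simp [G4]
  | succ m ih =>
    intro k hlen
    have hk : k < arr.length := by omega
    rw [PySem.List.pyRange_one_cons (by exact_mod_cast hk), List.flatMap_cons,
        PySem.List.pyRange_one_cons (by exact_mod_cast hk), List.flatMap_cons]
    have hnil : (PySem.List.pyRange (k : Int) (arr.length : Int) 1).flatMap (fun c =>
        (PySem.List.pyRange c (arr.length : Int) 1).flatMap (fun d =>
          if (k : Int) < (k : Int) ∧ (k : Int) < c ∧ c < d then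
            [PySem.List.pyGetD arr (k : Int) 0 - PySem.List.pyGetD arr (k : Int) 0 +
             PySem.List.pyGetD arr c 0 - PySem.List.pyGetD arr d 0]
          else [])) = [] := by
      simp
    rw [hnil, List.nil_append,
        show ((k : Int) + 1) = ((k + 1 : ℕ) : Int) by push_cast; ring,
        L3 arr m (k + 1) (k : Int) (by omega) (by push_cast; omega),
        ih (k + 1) (by omega),
        List.drop_eq_getElem_cons hk]
    have hgk : PySem.List.pyGetD arr (k : Int) 0 = arr[k] := by
      rw [PySem.List.pyGetD_natCast]; exact List.getD_eq_getElem arr 0 hk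
    simp only [hgk, G4]

theorem A_eq (arr : List Int) : MaximizeExpression arr = runMax (G4 arr) 0 := by
  unfold MaximizeExpression
  simp only [PySem.List.len_eq]
  have h1 : ∀ (a b c i : Int),
      (PySem.List.pyRange c (arr.length : Int) 1).foldl (fun cur d =>
        if a < b ∧ b < c ∧ c < d then
          max (PySem.List.pyGetD arr a 0 - PySem.List.pyGetD arr b 0 +
               PySem.List.pyGetD arr c 0 - PySem.List.pyGetD arr d 0) cur
        else cur) i =
      runMax ((PySem.List.pyRange c (arr.length : Int) 1).flatMap (fun d =>
        if a < b ∧ b < c ∧ c < d then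
          [PySem.List.pyGetD arr a 0 - PySem.List.pyGetD arr b 0 +
           PySem.List.pyGetD arr c 0 - PySem.List.pyGetD arr d 0]
        else [])) i := by
    intro a b c i
    rw [← foldl_runMax]
    apply PySem.List.foldl_congr_mem
    intro acc d _
    split <;> rfl
  have h2 : ∀ (a b i : Int),
      (PySem.List.pyRange b (arr.length : Int) 1).foldl (fun cur c =>
        (PySem.List.pyRange c (arr.length : Int) 1).foldl (fun cur d =>
          if a < b ∧ b < c ∧ c < d then
            max (PySem.List.pyGetD arr a 0 - PySem.List.pyGetD arr b 0 +
                 PySem.List.pyGetD arr c 0 - PySem.List.pyGetD arr d 0) cur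
          else cur) cur) i =
      runMax ((PySem.List.pyRange b (arr.length : Int) 1).flatMap (fun c =>
        (PySem.List.pyRange c (arr.length : Int) 1).flatMap (fun d =>
          if a < b ∧ b < c ∧ c < d then
            [PySem.List.pyGetD arr a 0 - PySem.List.pyGetD arr b 0 +
             PySem.List.pyGetD arr c 0 - PySem.List.pyGetD arr d 0]
          else []))) i := by
    intro a b i
    rw [← foldl_runMax]
    apply PySem.List.foldl_congr_mem
    intro acc c _
    exact h1 a b c acc
  have h3 : ∀ (a i : Int),
      (PySem.List.pyRange a (arr.length : Int) 1).foldl (fun cur b =>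
        (PySem.List.pyRange b (arr.length : Int) 1).foldl (fun cur c =>
          (PySem.List.pyRange c (arr.length : Int) 1).foldl (fun cur d =>
            if a < b ∧ b < c ∧ c < d then
              max (PySem.List.pyGetD arr a 0 - PySem.List.pyGetD arr b 0 +
                   PySem.List.pyGetD arr c 0 - PySem.List.pyGetD arr d 0) cur
            else cur) cur) cur) i =
      runMax ((PySem.List.pyRange a (arr.length : Int) 1).flatMap (fun b =>
        (PySem.List.pyRange b (arr.length : Int) 1).flatMap (fun c =>
          (PySem.List.pyRange c (arr.length : Int) 1).flatMap (fun d =>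
            if a < b ∧ b < c ∧ c < d then
              [PySem.List.pyGetD arr a 0 - PySem.List.pyGetD arr b 0 +
               PySem.List.pyGetD arr c 0 - PySem.List.pyGetD arr d 0]
            else [])))) i := by
    intro a i
    rw [← foldl_runMax]
    apply PySem.List.foldl_congr_mem
    intro acc b _
    exact h2 a b acc
  have h4 :
      (PySem.List.pyRange 0 (arr.length : Int) 1).foldl (fun cur a =>
        (PySem.List.pyRange a (arr.length : Int) 1).foldl (fun cur b =>
          (PySem.List.pyRange b (arr.length : Int) 1).foldl (fun cur c =>
            (PySem.List.pyRange c (arr.length : Int) 1).foldl (fun cur d =>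
              if a < b ∧ b < c ∧ c < d then
                max (PySem.List.pyGetD arr a 0 - PySem.List.pyGetD arr b 0 +
                     PySem.List.pyGetD arr c 0 - PySem.List.pyGetD arr d 0) cur
              else cur) cur) cur) cur) 0 =
      runMax ((PySem.List.pyRange 0 (arr.length : Int) 1).flatMap (fun a =>
        (PySem.List.pyRange a (arr.length : Int) 1).flatMap (fun b =>
          (PySem.List.pyRange b (arr.length : Int) 1).flatMap (fun c =>
            (PySem.List.pyRange c (arr.length : Int) 1).flatMap (fun d =>
              if a < b ∧ b < c ∧ c < d then
                [PySem.List.pyGetD arr a 0 - PySem.List.pyGetD arr b 0 +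
                 PySem.List.pyGetD arr c 0 - PySem.List.pyGetD arr d 0]
              else []))))) 0 := by
    rw [← foldl_runMax]
    apply PySem.List.foldl_congr_mem
    intro acc a _
    exact h3 a acc
  rw [h4]
  have hN := L4 arr arr.length 0 (by omega)
  simp only [Nat.cast_zero, List.drop_zero] at hN
  rw [hN]

-- ===== VERDICT (by name: the statement is the Claim_ definition above) =====
theorem MaximizeExpression_spec : Claim_equal_MaximizeExpression := by
  intro arr _
  show MaximizeExpression arr = MaximizeExpression_alt arr
  rw [A_eq, runMax_eq]
  unfold MaximizeExpression_alt
  rw [List.foldl_reverse, B_inv]
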